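-- pv_equiv track=rewrite | github.com/ghibulo/NumberedTriangles | NumberedTriangles.py | create_positions
-- ===== SOURCE A (Python) =====
-- def rotate(piece):
--         return [piece[2],piece[0],piece[1]]
--
-- def create_positions(fr):
--     r=[]
--     if len(fr) > 1:
--         next_perm = create_positions(fr[1:])
--         for i in range(3):
--             u=[[fr[0]]+el for el in next_perm]
--             r.extend(u)
--             fr[0] = rotate(fr[0])
--         return r
--     else:
--         for i in range(3):
--             r.append([fr[0]])
--             fr[0] = rotate(fr[0])
--         return r
-- ===== SOURCE B (Python) =====
-- def rotate(piece):
--         return [piece[2],piece[0],piece[1]]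
--
-- def create_positions(fr):
--     tables = [[p, rotate(p), rotate(rotate(p))] for p in fr]
--     result = [[]]
--     for table in reversed(tables):
--         result = [[x] + combo for x in table for combo in result]
--     return result
-- ===== Notes on version B (the rewrite author's own statement) =====
-- stated objective: idiomatic
-- what changed: B replaces A's recursion-with-in-place-rotation by precomputing each piece's rotation table and taking the cartesian product of the tables (leftmost-slowest, matching A's order), without mutating fr.
import Mathlib
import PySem

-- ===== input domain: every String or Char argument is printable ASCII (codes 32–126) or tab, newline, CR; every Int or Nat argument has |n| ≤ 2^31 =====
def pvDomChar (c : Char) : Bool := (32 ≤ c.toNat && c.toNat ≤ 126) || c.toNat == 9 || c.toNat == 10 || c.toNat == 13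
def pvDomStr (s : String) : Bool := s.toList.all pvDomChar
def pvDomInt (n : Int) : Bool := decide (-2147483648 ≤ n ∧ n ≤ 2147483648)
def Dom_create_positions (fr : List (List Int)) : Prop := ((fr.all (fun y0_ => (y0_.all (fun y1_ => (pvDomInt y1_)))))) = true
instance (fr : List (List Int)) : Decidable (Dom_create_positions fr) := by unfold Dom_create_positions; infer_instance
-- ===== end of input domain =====

-- B builds each piece's rotation table once and forms the cartesian product of the tables
-- (idiomatic; same order of results); return-value equivalence only — A rotates fr[0] in place
-- (net mutation observable for pieces longer than 3), B never mutates fr.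

-- ===== PORT A =====
-- rotate(piece): [piece[2], piece[0], piece[1]]; in-range under Pre_, so getD 0 never fires there
def rotA (p : List Int) : List Int :=
  [(PySem.List.pyGet? p 2).getD 0, (PySem.List.pyGet? p 0).getD 0, (PySem.List.pyGet? p 1).getD 0]

def create_positions (fr : List (List Int)) : List (List (List Int)) :=
  match fr with
  | [] => []   -- Python A raises IndexError here; excluded by Pre_
  | [p] =>
      ((List.range 3).foldl
        (fun (s : List (List (List Int)) × List Int) _ => (s.1 ++ [[s.2]], rotA s.2))
        ([], p)).1
  | p :: q :: rest =>
      let next := create_positions (q :: rest)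
      ((List.range 3).foldl
        (fun (s : List (List (List Int)) × List Int) _ =>
          (s.1 ++ next.map (fun el => s.2 :: el), rotA s.2))
        ([], p)).1

-- ===== PORT B =====
def rotB (p : List Int) : List Int :=
  [(PySem.List.pyGet? p 2).getD 0, (PySem.List.pyGet? p 0).getD 0, (PySem.List.pyGet? p 1).getD 0]

def create_positions_alt (fr : List (List Int)) : List (List (List Int)) :=
  let tables := fr.map (fun p => [p, rotB p, rotB (rotB p)])
  tables.reverse.foldl
    (fun result table => table.flatMap (fun x => result.map (fun combo => x :: combo)))
    [[]]

-- ===== PRECONDITION & SPEC =====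
-- Pre_: exactly the inputs on which Python A returns: fr nonempty (else fr[0] raises IndexError)
-- and every piece of length ≥ 3 (else rotate's piece[2] raises IndexError).
def Pre_create_positions (fr : List (List Int)) : Prop :=
  fr ≠ [] ∧ ∀ p ∈ fr, 3 ≤ p.length
instance (fr : List (List Int)) : Decidable (Pre_create_positions fr) := by
  unfold Pre_create_positions; infer_instance

def pvWitness_create_positions : List (List Int) := [[1, 2, 3], [4, 5, 6]]

def Spec_create_positions (fr : List (List Int)) (out : List (List (List Int))) : Prop := out = create_positions_alt fr
instance (fr : List (List Int)) (out : List (List (List Int))) : Decidable (Spec_create_positions fr out) := by unfold Spec_create_positions; infer_instance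

-- ===== CLAIM (what is proved, stated in full; the proofs are below) =====
def Claim_equal_create_positions : Prop := ∀ (fr : List (List Int)), Dom_create_positions fr → Pre_create_positions fr → Spec_create_positions fr (create_positions fr)

-- ===== LEMMAS AND PROOFS =====

-- B unfolds one table: alt (p :: rest) distributes p's three rotations over alt rest.
theorem alt_cons (p : List Int) (rest : List (List Int)) :
    create_positions_alt (p :: rest) =
      [p, rotB p, rotB (rotB p)].flatMap
        (fun x => (create_positions_alt rest).map (fun combo => x :: combo)) := by
  simp [create_positions_alt, List.foldl_append]

theorem equal_all_nonempty (fr : List (List Int)) (h : fr ≠ []) :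
    create_positions fr = create_positions_alt fr := by
  induction fr with
  | nil => exact absurd rfl h
  | cons p rest ih =>
    cases rest with
    | nil =>
      show create_positions [p] = create_positions_alt [p]
      simp [create_positions, create_positions_alt, List.range_succ, rotA, rotB]
    | cons q rs =>
      rw [alt_cons, ← ih (by simp)]
      show create_positions (p :: q :: rs) = _
      simp [create_positions, List.range_succ, rotA, rotB, List.flatMap]

-- ===== VERDICT (by name: the statement is the Claim_ definition above) =====
theorem create_positions_spec : Claim_equal_create_positions := by
  intro fr _ hpre
  exact equal_all_nonempty fr hpre.1
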